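-- pv_equiv track=rewrite | github.com/ftakanashi/JobProjects | _tmp/360cache1.py | process
-- ===== SOURCE A (Python) =====
-- def process(s):
--     i = len(s) - 1
--     while s[i] == 'a':
--         i -= 1
--     b_cnt = 0
--     ans = 0
--     while i >= 0:
--         if s[i] == 'b':
--             b_cnt += 1
--         else:
--             ans += b_cnt
--             b_cnt *= 2
--         i -= 1
--
--     return ans % (10**9 + 7)
-- ===== SOURCE B (Python) =====
-- def process(s):
--     # Single forward pass over the whole string, no trailing-'a' skip and no slicing:
--     # each 'b' contributes 2**(number of non-'b' chars before it) - 1; chars after the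
--     # last 'b' never contribute, so truncation is unnecessary.
--     ans = 0
--     non_b = 0
--     for ch in s:
--         if ch == 'b':
--             ans += (1 << non_b) - 1
--         else:
--             non_b += 1
--     return ans % (10 ** 9 + 7)
-- ===== Notes on version B (the rewrite author's own statement) =====
-- stated objective: simpler
-- what changed: Replaces A's backward scan with a doubling b_cnt recurrence (preceded by a trailing-'a' skip loop) by one plain forward pass over the whole string that counts non-'b' characters and adds the closed-form contribution 2^count - 1 at each 'b'; the skip loop and index arithmetic disappear entirely.
import Mathlib
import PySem

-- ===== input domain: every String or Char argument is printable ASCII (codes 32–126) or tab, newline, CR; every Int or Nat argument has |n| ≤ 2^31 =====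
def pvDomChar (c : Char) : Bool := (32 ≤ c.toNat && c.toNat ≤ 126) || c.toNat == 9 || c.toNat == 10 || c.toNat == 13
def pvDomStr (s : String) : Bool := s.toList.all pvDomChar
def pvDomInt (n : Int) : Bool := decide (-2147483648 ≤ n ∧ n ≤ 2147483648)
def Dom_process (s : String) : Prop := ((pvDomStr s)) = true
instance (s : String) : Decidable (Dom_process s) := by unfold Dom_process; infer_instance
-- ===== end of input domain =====

-- B replaces A's trailing-'a' skip plus backward doubling-b_cnt scan by one forward pass
-- adding the closed-form 2^(non-'b' count) - 1 at each 'b' (objective: simpler).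

-- ===== PORT A =====
-- the leading `while s[i] == 'a': i -= 1` loop; fuel bounds the iterations (2*len+2
-- suffices: after that many decrements the index is out of Python's negative range and
-- s[i] raises IndexError = none). none = the IndexError, excluded by Pre_.
def skipA (s : List Char) : Int → Nat → Option Int
  | _, 0 => none
  | i, fuel+1 =>
    match PySem.List.pyGet? s i with
    | none => none
    | some c => if c = 'a' then skipA s (i-1) fuel else some i

-- the main `while i >= 0` loop of A, carrying (i, b_cnt, ans)
def loopA (s : List Char) (i bcnt ans : Int) : Int :=
  if 0 ≤ i then
    if PySem.List.pyGet? s i = some 'b' then loopA s (i-1) (bcnt+1) ans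
    else loopA s (i-1) (bcnt*2) (ans + bcnt)
  else ans
termination_by (i+1).toNat
decreasing_by all_goals omega

def process (s : String) : Int :=
  match skipA s.toList ((s.toList.length : Int) - 1) (2 * s.toList.length + 2) with
  | none => 0   -- unreachable inside Pre_process: Python raises IndexError here
  | some i => loopA s.toList i 0 0 % (10^9 + 7)

-- ===== PORT B =====
-- body of B's `for ch in s` loop, state (ans, non_b); `1 << non_b` as 2^non_b
def stepB (st : Int × Nat) (ch : Char) : Int × Nat :=
  if ch = 'b' then (st.1 + (2^st.2 - 1), st.2) else (st.1, st.2 + 1)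

def process_alt (s : String) : Int :=
  (s.toList.foldl stepB (0, 0)).1 % (10^9 + 7)

-- ===== PRECONDITION & SPEC =====
-- Pre_ excludes exactly the strings whose characters are all 'a' (including the empty
-- string): there A's leading skip loop walks off the string and raises IndexError.
def Pre_process (s : String) : Prop := s.toList.any (fun c => c != 'a') = true
instance (s : String) : Decidable (Pre_process s) := by unfold Pre_process; infer_instance
def pvWitness_process : String := "bab"
def Spec_process (s : String) (out : Int) : Prop := out = process_alt s
instance (s : String) (out : Int) : Decidable (Spec_process s out) := by unfold Spec_process; infer_instance

-- ===== CLAIM (what is proved, stated in full; the proofs are below) =====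
def Claim_equal_process : Prop := ∀ (s : String), Dom_process s → Pre_process s → Spec_process s (process s)

-- ===== LEMMAS AND PROOFS =====

-- the skip loop reaches a nonnegative index holding a non-'a' char, with only 'a' above it
theorem skipA_some (s : List Char) : ∀ (fuel i : Nat), i < fuel → i < s.length →
    (∃ j : Nat, j ≤ i ∧ ∃ hj : j < s.length, s[j] ≠ 'a') →
    (∀ j : Nat, i < j → ∀ hj : j < s.length, s[j] = 'a') →
    ∃ k : Nat, ∃ hk : k < s.length, skipA s (i : Int) fuel = some (k : Int) ∧
      s[k] ≠ 'a' ∧ (∀ j : Nat, k < j → ∀ hj : j < s.length, s[j] = 'a') := by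
  intro fuel
  induction fuel with
  | zero => intro i h; omega
  | succ n ih =>
    intro i hfuel hi hex habove
    have hget : PySem.List.pyGet? s (i : Int) = some s[i] := by
      rw [PySem.List.pyGet?_natCast]; exact List.getElem?_eq_getElem hi
    by_cases hia : s[i] = 'a'
    · obtain ⟨j, hji, hj, hja⟩ := hex
      have hjne : j ≠ i := fun h => hja (by simpa [h] using hia)
      have hi1 : 1 ≤ i := by omega
      have hcast : (i : Int) - 1 = ((i - 1 : Nat) : Int) := by omega
      obtain ⟨k, hk, hsk, hkna, hka⟩ := ih (i - 1) (by omega) (by omega)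
        ⟨j, by omega, hj, hja⟩
        (by
          intro j' hj' hjl
          by_cases h : j' = i
          · subst h; exact hia
          · exact habove j' (by omega) hjl)
      refine ⟨k, hk, ?_, hkna, hka⟩
      simp only [skipA, hget, hia, hcast]
      simpa using hsk
    · refine ⟨i, hi, ?_, hia, habove⟩
      simp only [skipA, hget]
      simp [hia]

-- the backward recurrence of A's main loop, as a recursion over the reversed prefix
def revA : List Char → Int → Int
  | [], _ => 0
  | c :: r, b => if c = 'b' then revA r (b+1) else b + revA r (2*b)

-- A's loop from index k-1 computes ans + revA over the reversed k-prefix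
theorem loopA_eq (s : List Char) : ∀ (k : Nat), k ≤ s.length → ∀ (b a : Int),
    loopA s ((k : Int) - 1) b a = a + revA ((s.take k).reverse) b := by
  intro k
  induction k with
  | zero =>
    intro _ b a
    rw [loopA]
    norm_num [revA]
  | succ n ih =>
    intro hn b a
    have hlt : n < s.length := by omega
    have hget : PySem.List.pyGet? s ((n : Int)) = some s[n] := by
      rw [PySem.List.pyGet?_natCast]; exact List.getElem?_eq_getElem hlt
    have hcast : ((n + 1 : Nat) : Int) - 1 = (n : Int) := by push_cast; ring
    have htake : s.take (n + 1) = s.take n ++ [s[n]] := by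
      rw [List.take_add_one]; simp [List.getElem?_eq_getElem hlt]
    rw [hcast, loopA]
    have h0 : (0 : Int) ≤ (n : Int) := by positivity
    rw [if_pos h0, hget, htake, List.reverse_append]
    by_cases hb : s[n] = 'b'
    · rw [if_pos (by rw [hb]), ih (by omega) (b + 1) a]
      simp [revA, hb]
    · rw [if_neg (by simp [hb]), ih (by omega) (b * 2) (a + b)]
      simp [revA, hb]
      ring

-- the forward sum B computes: counter of non-'b' chars, 2^counter - 1 at each 'b'
def Ssum : List Char → Nat → Int
  | [], _ => 0
  | c :: t, n => if c = 'b' then (2^n - 1) + Ssum t n else Ssum t (n + 1)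

theorem foldl_stepB (l : List Char) : ∀ (a : Int) (n : Nat),
    (l.foldl stepB (a, n)).1 = a + Ssum l n := by
  induction l with
  | nil => intro a n; simp [Ssum]
  | cons c t ih =>
    intro a n
    by_cases hb : c = 'b'
    · simp only [List.foldl_cons, stepB, if_pos hb, ih, Ssum]
      ring
    · simp only [List.foldl_cons, stepB, if_neg hb, ih, Ssum]

theorem ssum_append (c : Char) : ∀ (m : List Char) (n : Nat),
    Ssum (m ++ [c]) n =
      Ssum m n + (if c = 'b' then 2 ^ (n + m.countP (fun x => x != 'b')) - 1 else 0) := by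
  intro m
  induction m with
  | nil => intro n; by_cases hb : c = 'b' <;> simp [Ssum, hb]
  | cons d t ih =>
    intro n
    by_cases hd : d = 'b'
    · simp [Ssum, hd, ih, add_assoc]
    · simp only [List.cons_append, Ssum, if_neg hd, ih]
      have : t.countP (fun x => x != 'b') + 1 = (d :: t).countP (fun x => x != 'b') := by
        simp [hd]
      rw [← this]
      ring_nf

-- the bridge: A's backward recurrence equals B's forward sum on the reversed list
theorem revA_eq (r : List Char) : ∀ (b : Int),
    revA r b = Ssum r.reverse 0 + b * (2 ^ (r.countP (fun x => x != 'b')) - 1) := by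
  induction r with
  | nil => intro b; simp [revA, Ssum]
  | cons c r' ih =>
    intro b
    have hcnt : r'.reverse.countP (fun x => x != 'b') = r'.countP (fun x => x != 'b') := by
      simp
    by_cases hb : c = 'b'
    · simp only [revA, ih, List.reverse_cons, ssum_append, hcnt, hb,
        List.countP_cons]
      simp
      ring
    · simp only [revA, if_neg hb, ih, List.reverse_cons, ssum_append, hcnt,
        List.countP_cons]
      simp [hb]
      ring

-- a suffix without 'b' contributes nothing to the forward sum
theorem ssum_no_b (t : List Char) : ∀ (n : Nat), (∀ c ∈ t, c ≠ 'b') → Ssum t n = 0 := by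
  induction t with
  | nil => intro n _; rfl
  | cons c t' ih =>
    intro n h
    have hc : c ≠ 'b' := h c (List.mem_cons_self ..)
    simp only [Ssum, if_neg hc]
    exact ih (n + 1) (fun d hd => h d (List.mem_cons_of_mem _ hd))

-- Ssum splits over append
theorem ssum_split (l : List Char) : ∀ (t : List Char) (n : Nat),
    Ssum (l ++ t) n = Ssum l n + Ssum t (n + l.countP (fun x => x != 'b')) := by
  induction l with
  | nil => intro t n; simp [Ssum]
  | cons c l' ih =>
    intro t n
    by_cases hb : c = 'b'
    · simp [Ssum, hb, ih, add_assoc]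
    · simp only [List.cons_append, Ssum, if_neg hb, ih, List.countP_cons]
      simp [hb]
      ring_nf

-- ===== VERDICT (by name: the statement is the Claim_ definition above) =====
theorem process_spec : Claim_equal_process := by
  intro s _ hPre
  unfold Spec_process process process_alt
  obtain ⟨c, hc, hca⟩ := List.any_eq_true.mp hPre
  obtain ⟨j, hj, hcj⟩ := List.mem_iff_getElem.mp hc
  have hja : s.toList[j] ≠ 'a' := by rw [hcj]; simpa using hca
  have hlen : 1 ≤ s.toList.length := by omega
  have hcast : ((s.toList.length : Int) - 1) = ((s.toList.length - 1 : Nat) : Int) := by omega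
  obtain ⟨k, hk, hsk, hkna, hka⟩ := skipA_some s.toList (2 * s.toList.length + 2)
    (s.toList.length - 1) (by omega) (by omega) ⟨j, by omega, hj, hja⟩
    (by intro j' hj' hjl; omega)
  rw [hcast, hsk]
  dsimp only
  have hloop : loopA s.toList ((k : Int)) 0 0 = revA ((s.toList.take (k + 1)).reverse) 0 := by
    have := loopA_eq s.toList (k + 1) (by omega) 0 0
    rw [show ((k + 1 : Nat) : Int) - 1 = (k : Int) by push_cast; ring] at this
    simpa using this
  have hdropa : ∀ c ∈ s.toList.drop (k + 1), c ≠ 'b' := by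
    intro c hc'
    obtain ⟨m, hm, hmc⟩ := List.mem_iff_getElem.mp hc'
    rw [List.getElem_drop] at hmc
    have := hka (k + 1 + m) (by omega) (by rw [List.length_drop] at hm; omega)
    rw [← hmc, this]; decide
  have hfull : Ssum s.toList 0 = Ssum (s.toList.take (k + 1)) 0 := by
    conv_lhs => rw [← List.take_append_drop (k + 1) s.toList]
    rw [ssum_split, ssum_no_b _ _ hdropa]
    ring
  rw [hloop, revA_eq, foldl_stepB, hfull]
  simp
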